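-- pv_equiv track=rewrite | github.com/HIvandic/Analiza-i-projektiranje-racunalom | 3.lab/lab3.py | izracunaj_h_h2
-- ===== SOURCE A (Python) =====
-- def izracunaj_h_h2(values):
--     h = 0
--     max = values[0]
--     h2 = 0
--     max2 = values[0]
--
--     for i in range(1, len(values)):
--         if values[i] > max:
--             h = i
--             max = values[i]
--
--     if h == 0:
--         h2 = 1
--         max2 = values[1]
--     for i in range(1, len(values)):
--         if i != h and values[i] > max2:
--             h2 = i
--             max2 = values[i]
--     return h, h2
-- ===== SOURCE B (Python) =====
-- def izracunaj_h_h2(values):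
--     maxv = values[0]
--     max2 = values[1]
--     if max2 > maxv:
--         h, h2 = 1, 0
--         maxv, max2 = max2, maxv
--     else:
--         h, h2 = 0, 1
--     for i in range(2, len(values)):
--         v = values[i]
--         if v > maxv:
--             h2, max2 = h, maxv
--             h, maxv = i, v
--         elif v > max2:
--             h2, max2 = i, v
--     return h, h2
-- ===== Notes on version B (the rewrite author's own statement) =====
-- stated objective: faster
-- what changed: Replaced A's two sequential index scans (argmax, then argmax-excluding-h with an h==0 reseeding special case) by one single pass that maintains both the top and the second candidate simultaneously, seeded from the first two elements.
import Mathlib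
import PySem

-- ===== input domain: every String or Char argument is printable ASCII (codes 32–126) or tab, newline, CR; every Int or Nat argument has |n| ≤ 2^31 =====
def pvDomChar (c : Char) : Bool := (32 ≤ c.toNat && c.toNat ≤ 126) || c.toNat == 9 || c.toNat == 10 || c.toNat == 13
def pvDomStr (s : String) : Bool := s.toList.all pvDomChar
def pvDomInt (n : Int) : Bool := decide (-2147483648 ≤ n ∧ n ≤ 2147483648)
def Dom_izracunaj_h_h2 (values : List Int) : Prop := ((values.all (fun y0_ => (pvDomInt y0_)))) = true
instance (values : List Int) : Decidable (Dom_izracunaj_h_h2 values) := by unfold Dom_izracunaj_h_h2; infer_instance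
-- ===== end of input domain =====

-- B replaces A's two sequential scans (argmax, then argmax-excluding-h with an h==0 reseed)
-- by one single pass maintaining both candidates at once.

-- values[i] (index always in range on the admitted inputs; the default is never used under Pre_)
def pvGet (values : List Int) (i : Int) : Int := (PySem.List.pyGet? values i).getD 0

-- ===== PORT A =====
def izracunaj_h_h2 (values : List Int) : Int × Int :=
  -- h = 0; max = values[0]; first loop: for i in range(1, len(values)):
  let s1 := (PySem.List.pyRange 1 (values.length : Int) 1).foldl
      (fun (s : Int × Int) i => if pvGet values i > s.2 then (i, pvGet values i) else s)
      (0, pvGet values 0)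
  let h := s1.1
  -- h2 = 0; max2 = values[0]; then: if h == 0: h2 = 1; max2 = values[1]
  let init2 : Int × Int := if h = 0 then (1, pvGet values 1) else (0, pvGet values 0)
  -- second loop: for i in range(1, len(values)):
  let s2 := (PySem.List.pyRange 1 (values.length : Int) 1).foldl
      (fun (s : Int × Int) i => if i ≠ h ∧ pvGet values i > s.2 then (i, pvGet values i) else s)
      init2
  (h, s2.1)

-- ===== PORT B =====
-- state is (h, maxv, h2, max2)
def izracunaj_h_h2_alt (values : List Int) : Int × Int :=
  let v0 := pvGet values 0
  let v1 := pvGet values 1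
  let init : Int × Int × Int × Int := if v1 > v0 then (1, v1, 0, v0) else (0, v0, 1, v1)
  let s := (PySem.List.pyRange 2 (values.length : Int) 1).foldl
      (fun (s : Int × Int × Int × Int) i =>
        let v := pvGet values i
        if v > s.2.1 then (i, v, s.1, s.2.1)
        else if v > s.2.2.2 then (s.1, s.2.1, i, v)
        else s)
      init
  (s.1, s.2.2.1)

-- ===== PRECONDITION & SPEC =====
-- Pre_ excludes lists of length < 2, on which the Python A raises IndexError (values[0] / values[1]).
def Pre_izracunaj_h_h2 (values : List Int) : Prop := 2 ≤ values.length
instance (values : List Int) : Decidable (Pre_izracunaj_h_h2 values) := by unfold Pre_izracunaj_h_h2; infer_instance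
def pvWitness_izracunaj_h_h2 : List Int := [3, 7, 5]

def Spec_izracunaj_h_h2 (values : List Int) (out : Int × Int) : Prop := out = izracunaj_h_h2_alt values
instance (values : List Int) (out : Int × Int) : Decidable (Spec_izracunaj_h_h2 values out) := by unfold Spec_izracunaj_h_h2; infer_instance

-- ===== CLAIM (what is proved, stated in full; the proofs are below) =====
def Claim_equal_izracunaj_h_h2 : Prop := ∀ (values : List Int), Dom_izracunaj_h_h2 values → Pre_izracunaj_h_h2 values → Spec_izracunaj_h_h2 values (izracunaj_h_h2 values)

-- ===== LEMMAS AND PROOFS =====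

-- First strict argmax of values[0..i-1] among indices ≠ e, scanned left to right.
def fargmax (values : List Int) (e : Int) : Nat → Option (Int × Int)
  | 0 => none
  | i + 1 =>
    match fargmax values e i with
    | none => if (i : Int) = e then none else some ((i : Int), pvGet values i)
    | some s =>
      if (i : Int) ≠ e ∧ pvGet values i > s.2 then some ((i : Int), pvGet values i) else some s

theorem fargmax_lt (values : List Int) (e : Int) (i : Nat) (s : Int × Int)
    (h : fargmax values e i = some s) : s.1 < (i : Int) := by
  induction i generalizing s with
  | zero => simp [fargmax] at h
  | succ i ih =>
    rw [fargmax] at h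
    rcases hf : fargmax values e i with _ | s' <;> rw [hf] at h <;> simp only [] at h
    · split_ifs at h with h1
      rcases Option.some.inj h with rfl
      simp
    · split_ifs at h with h1
      · rcases Option.some.inj h with rfl
        simp
      · rcases Option.some.inj h with rfl
        have := ih s' hf
        omega

theorem fargmax_excl_irrel (values : List Int) (e : Int) (i : Nat)
    (he : (i : Int) ≤ e ∨ e < 0) : fargmax values e i = fargmax values (-1) i := by
  induction i with
  | zero => rfl
  | succ i ih =>
    have hne : ¬ (i : Int) = e := by omega
    have hne' : ¬ (i : Int) = -1 := by omega
    unfold fargmax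
    rw [ih (by omega)]
    rcases hf : fargmax values (-1) i with _ | s <;> simp [hne, hne']

-- A's first loop computes fargmax with no exclusion.
theorem aLoop1_eq (values : List Int) (i : Nat) (hi : 1 ≤ i) :
    fargmax values (-1) i =
      some ((PySem.List.pyRange 1 (i : Int) 1).foldl
        (fun (s : Int × Int) k => if pvGet values k > s.2 then (k, pvGet values k) else s)
        (0, pvGet values 0)) := by
  induction i with
  | zero => omega
  | succ i ih =>
    rcases Nat.lt_or_ge i 1 with h1 | h1
    · interval_cases i
      have hr : PySem.List.pyRange 1 ((1 : Nat) : Int) 1 = [] :=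
        PySem.List.pyRange_one_eq_nil (by norm_num)
      rw [hr]
      simp [fargmax]
    · rw [show ((i + 1 : Nat) : Int) = (i : Int) + 1 by push_cast; ring,
          PySem.List.pyRange_one_succ_right (by omega : (1 : Int) ≤ (i : Int)),
          List.foldl_append]
      unfold fargmax
      rw [ih h1]
      simp only [List.foldl]
      have hne : ¬ (i : Int) = -1 := by omega
      by_cases hc : pvGet values i >
          ((PySem.List.pyRange 1 (i : Int) 1).foldl
            (fun (s : Int × Int) k => if pvGet values k > s.2 then (k, pvGet values k) else s)
            (0, pvGet values 0)).2 <;>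
        simp [hne, hc]

-- A's second loop (after A's h = 0 reseeding) computes fargmax excluding h, for any h.
theorem aLoop2_eq (values : List Int) (h : Int) (i : Nat) (hi : 2 ≤ i) :
    fargmax values h i =
      some ((PySem.List.pyRange 1 (i : Int) 1).foldl
        (fun (s : Int × Int) k => if k ≠ h ∧ pvGet values k > s.2 then (k, pvGet values k) else s)
        (if h = 0 then ((1 : Int), pvGet values 1) else (0, pvGet values 0))) := by
  induction i with
  | zero => omega
  | succ i ih =>
    rcases Nat.lt_or_ge i 2 with h2 | h2
    · have hi1 : i = 1 := by omega
      subst hi1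
      have hr : PySem.List.pyRange 1 ((2 : Nat) : Int) 1 = [(1 : Int)] := by
        rw [show ((2 : Nat) : Int) = (1 : Int) + 1 by norm_num]
        exact PySem.List.pyRange_one_singleton (a := 1)
      rw [show ((1 + 1 : Nat) : Int) = ((2 : Nat) : Int) by norm_num, hr]
      by_cases h0 : h = 0
      · subst h0; simp [fargmax, List.foldl]
      · simp only [fargmax, List.foldl, if_neg h0]
        have h01 : ¬ ((0 : Int)) = h := fun e => h0 e.symm
        by_cases hc : (1 : Int) ≠ h ∧ pvGet values 1 > pvGet values 0 <;> simp [h01, hc]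
    · rw [show ((i + 1 : Nat) : Int) = (i : Int) + 1 by push_cast; ring,
          PySem.List.pyRange_one_succ_right (by omega : (1 : Int) ≤ (i : Int)),
          List.foldl_append]
      unfold fargmax
      rw [ih h2]
      simp only [List.foldl]
      by_cases hc : (i : Int) ≠ h ∧ pvGet values i >
          ((PySem.List.pyRange 1 (i : Int) 1).foldl
            (fun (s : Int × Int) k => if k ≠ h ∧ pvGet values k > s.2 then (k, pvGet values k) else s)
            (if h = 0 then ((1 : Int), pvGet values 1) else (0, pvGet values 0))).2 <;>
        simp [hc]

-- B's single loop maintains both fargmax values (-1) i and fargmax values h i.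
theorem bLoop_eq (values : List Int) (i : Nat) (hi : 2 ≤ i) :
    ∃ h maxv h2 max2 : Int,
      (PySem.List.pyRange 2 (i : Int) 1).foldl
        (fun (s : Int × Int × Int × Int) k =>
          let v := pvGet values k
          if v > s.2.1 then (k, v, s.1, s.2.1)
          else if v > s.2.2.2 then (s.1, s.2.1, k, v)
          else s)
        (if pvGet values 1 > pvGet values 0
          then (1, pvGet values 1, 0, pvGet values 0)
          else (0, pvGet values 0, 1, pvGet values 1)) = (h, maxv, h2, max2) ∧
      fargmax values (-1) i = some (h, maxv) ∧ fargmax values h i = some (h2, max2) := by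
  induction i with
  | zero => omega
  | succ i ih =>
    rcases Nat.lt_or_ge i 2 with h2 | h2
    · have hi1 : i = 1 := by omega
      subst hi1
      have hr : PySem.List.pyRange 2 ((1 + 1 : Nat) : Int) 1 = [] :=
        PySem.List.pyRange_one_eq_nil (by norm_num)
      rw [hr]
      by_cases hc : pvGet values 1 > pvGet values 0
      · refine ⟨1, pvGet values 1, 0, pvGet values 0, by simp [hc], ?_, ?_⟩
        · simp [fargmax, hc]
        · norm_num [fargmax]
      · refine ⟨0, pvGet values 0, 1, pvGet values 1, by simp [hc], ?_, ?_⟩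
        · simp [fargmax, hc]
        · norm_num [fargmax]
    · obtain ⟨h, maxv, h2, max2, hfold, hmax, hsec⟩ := ih h2
      rw [show ((i + 1 : Nat) : Int) = (i : Int) + 1 by push_cast; ring,
          PySem.List.pyRange_one_succ_right (by omega : (2 : Int) ≤ (i : Int)),
          List.foldl_append, hfold]
      simp only [List.foldl]
      have hlt : h < (i : Int) := fargmax_lt values (-1) i (h, maxv) hmax
      have hne : ¬ (i : Int) = -1 := by omega
      have hneh : (i : Int) ≠ h := by omega
      by_cases c1 : pvGet values i > maxv
      · refine ⟨(i : Int), pvGet values i, h, maxv, by simp [c1], ?_, ?_⟩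
        · unfold fargmax; rw [hmax]; simp [hne, c1]
        · unfold fargmax
          rw [fargmax_excl_irrel values (i : Int) i (by omega), hmax]
          simp
      · by_cases c2 : pvGet values i > max2
        · refine ⟨h, maxv, (i : Int), pvGet values i, by simp [c1, c2], ?_, ?_⟩
          · unfold fargmax; rw [hmax]; simp [c1]
          · unfold fargmax; rw [hsec]; simp [hneh, c2]
        · refine ⟨h, maxv, h2, max2, by simp [c1, c2], ?_, ?_⟩
          · unfold fargmax; rw [hmax]; simp [c1]
          · unfold fargmax; rw [hsec]; simp [hneh, c2]

-- ===== VERDICT (by name: the statement is the Claim_ definition above) =====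
theorem izracunaj_h_h2_spec : Claim_equal_izracunaj_h_h2 := by
  intro values _ hpre
  unfold Spec_izracunaj_h_h2 izracunaj_h_h2 izracunaj_h_h2_alt
  have hn : 2 ≤ values.length := hpre
  obtain ⟨h, maxv, h2, max2, hfold, hmax, hsec⟩ := bLoop_eq values values.length hn
  have h1 := aLoop1_eq values values.length (by omega)
  rw [hmax] at h1
  have hA1 : ((PySem.List.pyRange 1 (values.length : Int) 1).foldl
      (fun (s : Int × Int) k => if pvGet values k > s.2 then (k, pvGet values k) else s)
      (0, pvGet values 0)) = (h, maxv) := (Option.some.inj h1).symm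
  have h2eq := aLoop2_eq values h values.length hn
  rw [hsec] at h2eq
  simp only [hA1, hfold]
  rw [← Option.some.inj h2eq]
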